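-- pv_equiv track=rewrite | github.com/Dec1mo/Vietnamese-Address-Parser | ultis/clean_data.py | handle_dup_substr
-- ===== SOURCE A (Python) =====
-- def handle_dup_substr(str):
-- 	for i in range(len(str)//2, 0, -1):
-- 		idx = str[i:].find(str[:i])
-- 		if idx != -1 and len(str[:i]) > 1 and idx < 3:
-- 			return str[i:]
-- 	for i in range(len(str)//2, int(len(str)*0.8)):
-- 		idx = str[:i].find(str[i:])
-- 		if idx != -1 and len(str[i:]) > 1 and idx < 3:
-- 			return str[:i]
-- 	return str
-- ===== SOURCE B (Python) =====
-- def handle_dup_substr(str):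
--     n = len(str)
--
--     def lcp_from(t, j):
--         # length of the longest common prefix of t and t[j:]
--         k = 0
--         while j + k < len(t) and t[k] == t[j + k]:
--             k += 1
--         return k
--
--     # z[j] = lcp(str, str[j:]): the prefix str[:i] occurs at position j iff z[j] >= i
--     z = [lcp_from(str, j) for j in range(n + 1)]
--     for i in range(n // 2, 1, -1):
--         if any(z[i + k] >= i for k in range(3)):
--             return str[i:]
--     # zr is the same table for the reversed string: the suffix str[i:] (length m)
--     # occurs at offset k inside str[:i] iff k+m <= i and zr[i-k] >= m
--     r = str[::-1]
--     zr = [lcp_from(r, j) for j in range(n + 1)]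
--     for i in range(n // 2, int(n * 0.8)):
--         m = n - i
--         if m > 1 and any(k + m <= i and zr[i - k] >= m for k in range(3)):
--             return str[:i]
--     return str
-- ===== Notes on version B (the rewrite author's own statement) =====
-- stated objective: faster
-- what changed: B never searches for substrings: it precomputes a longest-common-prefix (Z) table of the string and of its reverse, so every O(n*i) str.find scan of A becomes a single integer threshold comparison z[j] >= i on the table.
import Mathlib
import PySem

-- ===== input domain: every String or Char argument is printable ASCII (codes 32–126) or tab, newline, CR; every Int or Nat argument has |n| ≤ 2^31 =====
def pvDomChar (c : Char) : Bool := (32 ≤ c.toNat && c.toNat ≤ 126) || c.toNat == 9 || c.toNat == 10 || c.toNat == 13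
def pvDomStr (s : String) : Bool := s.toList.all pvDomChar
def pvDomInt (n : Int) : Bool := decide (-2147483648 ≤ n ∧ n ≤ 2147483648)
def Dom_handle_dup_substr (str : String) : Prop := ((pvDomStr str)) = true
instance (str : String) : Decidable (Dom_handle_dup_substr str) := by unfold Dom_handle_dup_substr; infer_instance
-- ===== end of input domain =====

-- B drops every substring search: it precomputes a longest-common-prefix (Z) table of the
-- string and of its reverse, and each str.find test of A becomes an integer comparison z[j] ≥ i.

-- Exact integer model of CPython's `int(n * 0.8)`: the product of the doubles n and
-- 0.8 = 3602879701896397/2^52 is rounded to 53 significant bits (nearest, ties to even),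
-- then truncated.  The same expression occurs in A and in B, so both ports share it.
def pyIntTimes08 (n : Nat) : Nat :=
  let p := n * 3602879701896397
  if p < 2 ^ 53 then p >>> 52
  else
    let e := PySem.Int.bitLength (p : Int) - 53
    let q := p >>> e
    let r := p - (q <<< e)
    let half := 2 ^ (e - 1)
    let q' := if half < r ∨ (r = half ∧ q % 2 = 1) then q + 1 else q
    (q' <<< e) >>> 52

-- ===== PORT A =====
-- body of A's first loop: idx = str[i:].find(str[:i]); if idx != -1 and len(str[:i]) > 1 and idx < 3: return str[i:]
def pvA_f1 (s : List Char) (i : Int) : Option (List Char) :=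
  let pre := PySem.List.slice s none (some i)
  let suf := PySem.List.slice s (some i) none
  let idx := PySem.Chars.find suf pre
  if idx ≠ -1 ∧ 1 < pre.length ∧ idx < 3 then some suf else none

-- body of A's second loop: idx = str[:i].find(str[i:]); if idx != -1 and len(str[i:]) > 1 and idx < 3: return str[:i]
def pvA_f2 (s : List Char) (i : Int) : Option (List Char) :=
  let pre := PySem.List.slice s none (some i)
  let suf := PySem.List.slice s (some i) none
  let idx := PySem.Chars.find pre suf
  if idx ≠ -1 ∧ 1 < suf.length ∧ idx < 3 then some pre else none

def handle_dup_substr (str : String) : String :=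
  match (PySem.List.pyRange (PySem.Int.floordiv (str.toList.length : Int) 2) 0 (-1)).findSome?
      (pvA_f1 str.toList) with
  | some r => String.ofList r
  | none =>
    match (PySem.List.pyRange (PySem.Int.floordiv (str.toList.length : Int) 2)
        ((pyIntTimes08 str.toList.length : Nat) : Int) 1).findSome? (pvA_f2 str.toList) with
    | some r => String.ofList r
    | none => str

-- ===== PORT B =====
-- Source B's lcp_from(t, j): two-pointer walk comparing t[k] with t[j+k]; ported as the structural
-- recursion over the two suffixes t and t.drop j (exact: same comparisons in the same order)
def pvLcp : List Char → List Char → Nat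
  | a :: as, b :: bs => if a = b then pvLcp as bs + 1 else 0
  | _, _ => 0

-- Source B's table z = [lcp_from(t, j) for j in range(n+1)]
def pvZ (t : List Char) : List Nat :=
  (List.range (t.length + 1)).map (fun j => pvLcp t (t.drop j))

-- body of B's first loop: if any(z[i+k] >= i for k in range(3)): return str[i:]
def pvB_f1 (s : List Char) (z : List Nat) (i : Int) : Option (List Char) :=
  if (List.range 3).any (fun k => decide (i ≤ ((z.getD (i.toNat + k) 0 : Nat) : Int)))
  then some (PySem.List.slice s (some i) none) else none

-- body of B's second loop: m = n-i; if m > 1 and any(k+m <= i and zr[i-k] >= m for k in range(3)): return str[:i]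
def pvB_f2 (s : List Char) (zr : List Nat) (i : Int) : Option (List Char) :=
  let m : Int := (s.length : Int) - i
  if 1 < m ∧ (List.range 3).any (fun k =>
        decide ((k : Int) + m ≤ i) && decide (m ≤ ((zr.getD (i.toNat - k) 0 : Nat) : Int)))
  then some (PySem.List.slice s none (some i)) else none

def handle_dup_substr_alt (str : String) : String :=
  let s := str.toList
  let z := pvZ s
  match (PySem.List.pyRange (PySem.Int.floordiv (s.length : Int) 2) 1 (-1)).findSome?
      (pvB_f1 s z) with
  | some r => String.ofList r
  | none =>
    let zr := pvZ s.reverse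
    match (PySem.List.pyRange (PySem.Int.floordiv (s.length : Int) 2)
        ((pyIntTimes08 s.length : Nat) : Int) 1).findSome? (pvB_f2 s zr) with
    | some r => String.ofList r
    | none => str

-- ===== PRECONDITION & SPEC =====
def Spec_handle_dup_substr (str : String) (out : String) : Prop := out = handle_dup_substr_alt str
instance (str : String) (out : String) : Decidable (Spec_handle_dup_substr str out) := by unfold Spec_handle_dup_substr; infer_instance

-- ===== CLAIM (what is proved, stated in full; the proofs are below) =====
def Claim_equal_handle_dup_substr : Prop := ∀ (str : String), Dom_handle_dup_substr str → Spec_handle_dup_substr str (handle_dup_substr str)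

-- ===== LEMMAS AND PROOFS =====

theorem pv_findSome?_congr {α β : Type} (l : List α) (f g : α → Option β)
    (h : ∀ a ∈ l, f a = g a) : l.findSome? f = l.findSome? g := by
  induction l with
  | nil => rfl
  | cons x xs ih =>
    simp only [List.findSome?]
    rw [h x (by simp)]
    cases g x <;> simp [ih (fun a ha => h a (by simp [ha]))]

theorem pv_prefix_iff_take {p t : List Char} : p <+: t ↔ t.take p.length = p := by
  constructor
  · intro h; exact (List.prefix_iff_eq_take.mp h).symm
  · intro h; exact List.prefix_iff_eq_take.mpr h.symm

-- the first-occurrence index is below m iff an occurrence starts at some offset k < m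
theorem pv_find_lt_iff (h p : List Char) (m : Nat) :
    (PySem.Chars.find h p ≠ -1 ∧ PySem.Chars.find h p < (m : Int)) ↔
      ∃ k < m, p <+: h.drop k := by
  constructor
  · rintro ⟨hne, hlt⟩
    have hnn : 0 ≤ PySem.Chars.find h p :=
      (PySem.Chars.find_nonneg_iff h p).mpr ((PySem.Chars.find_ne_neg_one_iff h p).mp hne)
    obtain ⟨hpre, _⟩ := PySem.Chars.find_spec hnn
    exact ⟨(PySem.Chars.find h p).toNat, by omega, hpre⟩
  · rintro ⟨k, hk, hpre⟩
    have hinf : p <:+: h := hpre.isInfix.trans (List.drop_suffix k h).isInfix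
    have hne : PySem.Chars.find h p ≠ -1 := (PySem.Chars.find_ne_neg_one_iff h p).mpr hinf
    have hnn : 0 ≤ PySem.Chars.find h p := (PySem.Chars.find_nonneg_iff h p).mpr hinf
    obtain ⟨_, hmin⟩ := PySem.Chars.find_spec hnn
    refine ⟨hne, ?_⟩
    by_contra hge
    exact hmin k (by omega) hpre

-- A's first loop never fires at i = 1 (its `len(str[:i]) > 1` test fails)
theorem pv_f1_one (s : List Char) : pvA_f1 s 1 = none := by
  simp only [pvA_f1]
  rw [if_neg]
  rintro ⟨-, h, -⟩
  rw [show (1:Int) = ((1:Nat):Int) from rfl, PySem.List.slice_to_natCast] at h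
  simp at h

-- the LCP function measures exactly the agreeing prefixes
theorem pv_lcp_ge_iff (a b : List Char) (n : Nat) :
    n ≤ pvLcp a b ↔ n ≤ a.length ∧ a.take n = b.take n := by
  induction a generalizing b n with
  | nil => cases n <;> simp [pvLcp]
  | cons x xs ih =>
    cases b with
    | nil => cases n <;> simp [pvLcp]
    | cons y ys =>
      cases n with
      | zero => simp
      | succ n =>
        by_cases hxy : x = y
        · subst hxy
          simp only [pvLcp, if_true, List.take_succ_cons, List.length_cons,
            Nat.add_le_add_iff_right, ih ys n, List.cons.injEq, true_and]
        · simp only [pvLcp, if_neg hxy, List.take_succ_cons, List.length_cons]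
          refine iff_of_false (by omega) ?_
          rintro ⟨-, h⟩
          injection h with h1 _
          exact hxy h1

-- table lookup: z[p] is the LCP of t with its suffix t[p:]
theorem pv_z_get (t : List Char) (p : Nat) (hp : p ≤ t.length) :
    (pvZ t).getD p 0 = pvLcp t (t.drop p) := by
  unfold pvZ
  rw [List.getD_eq_getElem?_getD, List.getElem?_map, List.getElem?_range (by omega)]
  rfl

-- z[j+k] ≥ j ⇔ the prefix of length j occurs at offset k into str[j:]
theorem pv_z_occ1 (s : List Char) (j k : Nat) (hj : j ≤ s.length) :
    ((j : Int) ≤ (((pvZ s).getD (j + k) 0 : Nat) : Int)) ↔ s.take j <+: (s.drop j).drop k := by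
  rw [List.drop_drop]
  by_cases hin : j + k ≤ s.length
  · rw [pv_z_get s (j + k) hin, pv_prefix_iff_take]
    have hlen : (s.take j).length = j := by simp; omega
    rw [hlen, Int.ofNat_le, pv_lcp_ge_iff]
    constructor
    · rintro ⟨-, h⟩; exact h.symm
    · intro h; exact ⟨hj, h.symm⟩
  · have hz : (pvZ s).getD (j + k) 0 = 0 := by
      have hlen2 : (pvZ s).length ≤ j + k := by
        simp only [pvZ, List.length_map, List.length_range]
        omega
      exact List.getD_eq_default _ _ hlen2
    rw [hz]
    have hd : s.drop (j + k) = [] := List.drop_eq_nil_of_le (by omega)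
    rw [hd]
    constructor
    · intro h
      have : j = 0 := by omega
      subst this; simp
    · intro h
      have hlen3 := h.length_le
      simp only [List.length_take, List.length_nil, Nat.le_zero] at hlen3
      omega

-- zr[j-k] ≥ m ⇔ the suffix of length m = n-j occurs at offset k in the prefix str[:j]
theorem pv_z_occ2 (s : List Char) (j k m : Nat) (hm : m = s.length - j)
    (hk : k + m ≤ j) (hj : j ≤ s.length) (hm0 : 0 < m) :
    (((m : Nat) : Int) ≤ (((pvZ s.reverse).getD (j - k) 0 : Nat) : Int)) ↔
      (s.drop k).take m = s.drop j := by
  have hjk : j - k ≤ s.reverse.length := by simp; omega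
  rw [pv_z_get s.reverse (j - k) hjk, Int.ofNat_le, pv_lcp_ge_iff]
  have h1 : s.reverse.take m = (s.drop j).reverse := by
    rw [List.take_reverse]
    congr 2
    omega
  have h2 : (s.reverse.drop (j - k)).take m = ((s.drop k).take m).reverse := by
    rw [List.drop_reverse, List.take_reverse]
    have hl : (s.take (s.length - (j - k))).length = s.length - (j - k) := by
      rw [List.length_take]
      omega
    rw [hl, show s.length - (j - k) - m = k from by omega, List.drop_take,
        show s.length - (j - k) - k = m from by omega]
  rw [h1, h2]
  constructor
  · rintro ⟨-, h⟩
    exact (List.reverse_injective h).symm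
  · intro h
    exact ⟨by simp; omega, by rw [h]⟩

-- the bodies of the two first loops agree on every index both loops visit
theorem pv_f1_eq (s : List Char) (j : Nat) (h1 : 2 ≤ j) (h2 : 2 * j ≤ s.length) :
    pvA_f1 s (j : Int) = pvB_f1 s (pvZ s) (j : Int) := by
  have hjl : j ≤ s.length := by omega
  simp only [pvA_f1, pvB_f1]
  rw [PySem.List.slice_to_natCast, PySem.List.slice_from_natCast]
  refine if_congr ?_ rfl rfl
  have hlen : (s.take j).length = j := by simp; omega
  have hAB : (PySem.Chars.find (s.drop j) (s.take j) ≠ -1 ∧ 1 < (s.take j).length ∧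
      PySem.Chars.find (s.drop j) (s.take j) < 3) ↔
      (PySem.Chars.find (s.drop j) (s.take j) ≠ -1 ∧
        PySem.Chars.find (s.drop j) (s.take j) < ((3:Nat):Int)) := by
    constructor
    · rintro ⟨a, -, c⟩; exact ⟨a, by exact_mod_cast c⟩
    · rintro ⟨a, c⟩; exact ⟨a, by omega, by exact_mod_cast c⟩
  rw [hAB, pv_find_lt_iff]
  have htn : ((j : Int)).toNat = j := by omega
  simp only [List.any_eq_true, List.mem_range, decide_eq_true_eq, htn]
  constructor
  · rintro ⟨k, hk, hp⟩
    exact ⟨k, hk, (pv_z_occ1 s j k hjl).mpr hp⟩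
  · rintro ⟨k, hk, h⟩
    exact ⟨k, hk, (pv_z_occ1 s j k hjl).mp h⟩

-- occurrence of the suffix at offset k inside the prefix ⇔ the guarded slice equality
theorem pv_occ2 (s : List Char) (j k m' : Nat) (hm : m' = s.length - j) (hj : j + 2 ≤ s.length) :
    (s.drop j <+: (s.take j).drop k) ↔ (k + m' ≤ j ∧ (s.drop k).take m' = s.drop j) := by
  have hlsuf : (s.drop j).length = m' := by simp [hm]
  rw [pv_prefix_iff_take, hlsuf, List.drop_take, List.take_take]
  by_cases hc : k + m' ≤ j
  · have hmin : min m' (j - k) = m' := by omega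
    rw [hmin]
    exact ⟨fun h => ⟨hc, h⟩, fun ⟨_, h⟩ => h⟩
  · have hmin : min m' (j - k) = j - k := by omega
    rw [hmin]
    constructor
    · intro h
      exfalso
      have hl := congrArg List.length h
      simp at hl
      omega
    · rintro ⟨h, -⟩
      exact absurd h hc

-- the bodies of the two second loops agree at every nonnegative index
theorem pv_f2_eq (s : List Char) (j : Nat) :
    pvA_f2 s (j : Int) = pvB_f2 s (pvZ s.reverse) (j : Int) := by
  simp only [pvA_f2, pvB_f2]
  rw [PySem.List.slice_to_natCast, PySem.List.slice_from_natCast]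
  refine if_congr ?_ rfl rfl
  have htn : ((j : Int)).toNat = j := by omega
  by_cases hsm : j + 2 ≤ s.length
  · have hlen : (s.drop j).length = s.length - j := by simp
    have hAB : (PySem.Chars.find (s.take j) (s.drop j) ≠ -1 ∧ 1 < (s.drop j).length ∧
        PySem.Chars.find (s.take j) (s.drop j) < 3) ↔
        (PySem.Chars.find (s.take j) (s.drop j) ≠ -1 ∧
          PySem.Chars.find (s.take j) (s.drop j) < ((3:Nat):Int)) := by
      constructor
      · rintro ⟨a, -, c⟩; exact ⟨a, by exact_mod_cast c⟩
      · rintro ⟨a, c⟩; exact ⟨a, by omega, by exact_mod_cast c⟩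
    rw [hAB, pv_find_lt_iff]
    simp only [List.any_eq_true, List.mem_range, Bool.and_eq_true, decide_eq_true_eq, htn]
    constructor
    · rintro ⟨k, hk, hp⟩
      have hocc := (pv_occ2 s j k (s.length - j) rfl hsm).mp hp
      refine ⟨by omega, k, hk, by omega, ?_⟩
      rw [show ((s.length : Int) - (j : Int)) = (((s.length - j : Nat) : Nat) : Int) from by omega]
      rw [pv_z_occ2 s j k (s.length - j) rfl (by omega) (by omega) (by omega)]
      exact hocc.2
    · rintro ⟨-, k, hk, hle, heq⟩
      have hle' : k + (s.length - j) ≤ j := by omega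
      rw [show ((s.length : Int) - (j : Int)) = (((s.length - j : Nat) : Nat) : Int) from by omega] at heq
      rw [pv_z_occ2 s j k (s.length - j) rfl hle' (by omega) (by omega)] at heq
      exact ⟨k, hk, (pv_occ2 s j k (s.length - j) rfl hsm).mpr ⟨hle', heq⟩⟩
  · refine iff_of_false ?_ ?_
    · rintro ⟨-, h, -⟩
      simp at h
      omega
    · rintro ⟨h, -⟩
      omega

-- A's first loop (range(n//2, 0, -1) with find) equals B's (range(n//2, 1, -1) with the z table)
theorem pv_loop1 (s : List Char) :
    (PySem.List.pyRange (PySem.Int.floordiv (s.length : Int) 2) 0 (-1)).findSome? (pvA_f1 s) =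
    (PySem.List.pyRange (PySem.Int.floordiv (s.length : Int) 2) 1 (-1)).findSome? (pvB_f1 s (pvZ s)) := by
  have ha : PySem.Int.floordiv (s.length : Int) 2 = ((s.length / 2 : Nat) : Int) := by
    exact_mod_cast PySem.Int.floordiv_natCast s.length 2
  rw [ha]
  have hcongr : ∀ l : List Int, (∀ x ∈ l, 2 ≤ x ∧ x ≤ (s.length / 2 : Nat)) →
      l.findSome? (pvA_f1 s) = l.findSome? (pvB_f1 s (pvZ s)) := by
    intro l hl
    apply pv_findSome?_congr
    intro i hi
    obtain ⟨hi2, hile⟩ := hl i hi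
    have hcast : i = ((i.toNat : Nat) : Int) := by omega
    rw [hcast]
    apply pv_f1_eq s i.toNat (by omega)
    have h : (i.toNat : Int) ≤ ((s.length / 2 : Nat) : Int) := by omega
    have h' : i.toNat ≤ s.length / 2 := by exact_mod_cast h
    omega
  by_cases h0 : s.length / 2 = 0
  · rw [h0]
    rw [show ((0:Nat):Int) = (0:Int) by norm_num]
    rw [PySem.List.pyRange_neg_one_eq_nil (by norm_num), PySem.List.pyRange_neg_one_eq_nil (by norm_num)]
    rfl
  · rw [PySem.List.pyRange_neg_one_eq_reverse, PySem.List.pyRange_neg_one_eq_reverse]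
    rw [show (0:Int) + 1 = 1 from rfl]
    rw [PySem.List.pyRange_one_cons (by omega)]
    simp only [List.reverse_cons]
    rw [List.findSome?_append]
    rw [show ([(1:Int)].findSome? (pvA_f1 s)) = none from by simp [List.findSome?, pv_f1_one s]]
    rw [Option.or_none]
    apply hcongr
    intro x hx
    rw [List.mem_reverse, PySem.List.mem_pyRange_one] at hx
    omega

-- the two second loops run over the same range with pointwise-equal bodies
theorem pv_loop2 (s : List Char) :
    (PySem.List.pyRange (PySem.Int.floordiv (s.length : Int) 2)
        ((pyIntTimes08 s.length : Nat) : Int) 1).findSome? (pvA_f2 s) =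
    (PySem.List.pyRange (PySem.Int.floordiv (s.length : Int) 2)
        ((pyIntTimes08 s.length : Nat) : Int) 1).findSome? (pvB_f2 s (pvZ s.reverse)) := by
  apply pv_findSome?_congr
  intro i hi
  have ha : PySem.Int.floordiv (s.length : Int) 2 = ((s.length / 2 : Nat) : Int) := by
    exact_mod_cast PySem.Int.floordiv_natCast s.length 2
  rw [ha, PySem.List.mem_pyRange_one] at hi
  have hcast : i = ((i.toNat : Nat) : Int) := by omega
  rw [hcast]
  exact pv_f2_eq s i.toNat

-- ===== VERDICT (by name: the statement is the Claim_ definition above) =====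
theorem handle_dup_substr_spec : Claim_equal_handle_dup_substr := by
  intro str _
  unfold Spec_handle_dup_substr handle_dup_substr handle_dup_substr_alt
  rw [pv_loop1, pv_loop2]
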